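-- pv_equiv track=rewrite | github.com/Ananta-dot/integrated | src/seeds.py | motif_seeds
-- ===== SOURCE A (Python) =====
-- from typing import List, Tuple
--
-- Seq = List[int]
--
-- def motif_rainbow(n: int) -> Seq:
--     return list(range(1, n+1)) + list(range(n, 0, -1))
--
-- def motif_doubled(n: int) -> Seq:
--     out=[];
--     for i in range(1, n+1): out += [i,i]
--     return out
--
-- def motif_interleave(n: int) -> Seq:
--     out=[]
--     for i in range(1, n+1, 2):
--         j = i+1 if i+1 <= n else i
--         out += [i, j, i, j]
--     cnt = {i:0 for i in range(1,n+1)}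
--     fixed=[]
--     for x in out:
--         if cnt[x] < 2: fixed.append(x); cnt[x]+=1
--     for i in range(1,n+1):
--         while cnt[i] < 2: fixed.append(i); cnt[i]+=1
--     return fixed[:2*n]
--
-- def motif_zipper(n: int) -> Seq:
--     out=[]
--     for i in range(1, (n//2)+1):
--         j = n - i + 1
--         out += [i, j, i, j]
--     if n % 2 == 1:
--         k = (n//2)+1
--         out += [k,k]
--     return out[:2*n]
--
-- def motif_ladder(n: int) -> Seq:
--     out=[]; a, b = 1, 2
--     while len(out) < 2*n:
--         out += [a, b if b<=n else a]
--         a += 1; b += 1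
--         if a > n: a = n
--         if b > n: b = n
--     cnt = {i:0 for i in range(1,n+1)}
--     fixed=[]
--     for x in out:
--         if cnt[x] < 2: fixed.append(x); cnt[x]+=1
--     for i in range(1,n+1):
--         while cnt[i] < 2: fixed.append(i); cnt[i]+=1
--     return fixed[:2*n]
--
-- def motif_seeds(n: int) -> List[Seq]:
--     S = [
--         motif_rainbow(n),
--         motif_doubled(n),
--         motif_interleave(n),
--         motif_zipper(n),
--         motif_ladder(n),
--         list(range(1, n+1)) + list(range(1, n+1)),
--         [x for pair in zip(range(1,n+1), range(1,n+1)) for x in pair],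
--     ]
--     out=[]
--     for s in S:
--         if len(s)==2*n and all(s.count(i)==2 for i in range(1,n+1)): out.append(s)
--     return out
-- ===== SOURCE B (Python) =====
-- from typing import List
--
-- Seq = List[int]
--
-- # B: each motif is produced by a direct closed-form / two-pointer / recursive-shape
-- # construction instead of A's generate-then-repair passes, and the filter compares
-- # sorted(s) against the reference multiset instead of n count() scans.
--
-- def motif_rainbow(n: int) -> Seq:
--     # position formula: value at i is min(i, 2n+1-i)
--     return [min(i, 2*n + 1 - i) for i in range(1, 2*n + 1)]
--
-- def motif_doubled(n: int) -> Seq: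
--     # position formula: 1,1,2,2,... is (i+1)//2 at i = 1..2n
--     return [(i + 1) // 2 for i in range(1, 2*n + 1)]
--
-- def motif_interleave(n: int) -> Seq:
--     # direct construction: quads (i,i+1,i,i+1) for odd i < n, plus (n,n) when n is odd;
--     # no count-repair pass is needed because this is already the repaired sequence
--     out = []
--     for i in range(1, n, 2):
--         out += [i, i + 1, i, i + 1]
--     if n % 2 == 1:
--         out += [n, n]
--     return out
--
-- def motif_zipper(n: int) -> Seq:
--     # two-pointer construction, no slicing
--     out = []
--     lo, hi = 1, n
--     while lo < hi:
--         out += [lo, hi, lo, hi]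
--         lo += 1
--         hi -= 1
--     if lo == hi:
--         out += [lo, lo]
--     return out
--
-- def motif_ladder(n: int) -> Seq:
--     # the repaired ladder is exactly 1,2,2,3,3,...,n,n,1 — build it directly
--     if n <= 0:
--         return []
--     out = [1]
--     for i in range(2, n + 1):
--         out += [i, i]
--     out.append(1)
--     return out
--
-- def motif_seeds(n: int) -> List[Seq]:
--     S = [
--         motif_rainbow(n),
--         motif_doubled(n),
--         motif_interleave(n),
--         motif_zipper(n),
--         motif_ladder(n),
--         list(range(1, n + 1)) * 2,
--         [v for i in range(1, n + 1) for v in (i, i)],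
--     ]
--     expected = sorted(list(range(1, n + 1)) * 2)
--     return [s for s in S if len(s) == 2*n and sorted(s) == expected]
-- ===== Notes on version B (the rewrite author's own statement) =====
-- stated objective: faster
-- what changed: B builds each motif directly in its final shape (a min position formula for the rainbow, an (i+1)//2 formula for the doubled run, explicit odd-quad and two-pointer loops for interleave/zipper, and the literal 1,2,2,...,n,n,1 ladder) instead of A's generate-then-count-repair-then-truncate passes, and the filter compares sorted(s) with the precomputed reference multiset instead of running n count() scans per candidate.
import Mathlib
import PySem

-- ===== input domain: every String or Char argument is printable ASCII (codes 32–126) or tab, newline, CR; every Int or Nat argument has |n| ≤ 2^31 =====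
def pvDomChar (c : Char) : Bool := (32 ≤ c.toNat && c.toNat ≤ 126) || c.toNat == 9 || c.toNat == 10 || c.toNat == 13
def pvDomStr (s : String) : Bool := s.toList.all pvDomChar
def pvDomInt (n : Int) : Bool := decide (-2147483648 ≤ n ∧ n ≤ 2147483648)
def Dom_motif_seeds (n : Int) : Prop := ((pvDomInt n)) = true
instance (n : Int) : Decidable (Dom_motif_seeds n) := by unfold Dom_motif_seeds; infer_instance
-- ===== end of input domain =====

-- B rebuilds every motif by a direct construction (position formulas, a two-pointer loop,
-- the already-repaired ladder) instead of A's generate-then-count-repair passes, and the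
-- filter compares sorted(s) with the reference multiset instead of n count() scans.

-- ===== PORT A =====

def motif_rainbow (n : Int) : List Int :=
  PySem.List.pyRange 1 (n+1) 1 ++ PySem.List.pyRange n 0 (-1)

def motif_doubled (n : Int) : List Int :=
  (PySem.List.pyRange 1 (n+1) 1).foldl (fun out i => out ++ [i, i]) []

-- the 'for x in out: if cnt[x] < 2: …' pass (cnt[x] is always a present key; getD is exact there)
def fixFold (cnt : PySem.Dict Int Int) (out : List Int) : PySem.Dict Int Int × List Int :=
  out.foldl (fun p x =>
    if p.1.getD x 0 < 2 then (p.1.modify x 0 (· + 1), p.2 ++ [x]) else p) (cnt, [])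

-- the inner 'while cnt[i] < 2: fixed.append(i); cnt[i] += 1'
def fillWhile (cnt : PySem.Dict Int Int) (fixed : List Int) (i : Int) :
    PySem.Dict Int Int × List Int :=
  if _h : cnt.getD i 0 < 2 then
    fillWhile (cnt.modify i 0 (· + 1)) (fixed ++ [i]) i
  else (cnt, fixed)
termination_by (2 - cnt.getD i 0).toNat
decreasing_by
  rw [PySem.Dict.getD_modify_self]
  omega

-- 'for i in range(1, n+1): while cnt[i] < 2: …'
def fillAll (n : Int) (p : PySem.Dict Int Int × List Int) : PySem.Dict Int Int × List Int :=
  (PySem.List.pyRange 1 (n+1) 1).foldl (fun p i => fillWhile p.1 p.2 i) p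

-- 'cnt = {i:0 for i in range(1, n+1)}'
def initCnt (n : Int) : PySem.Dict Int Int :=
  (PySem.List.pyRange 1 (n+1) 1).foldl (fun d i => d.insert i 0) PySem.Dict.empty

def motif_interleave (n : Int) : List Int :=
  let out := (PySem.List.pyRange 1 (n+1) 2).foldl (fun out i =>
    let j := if i + 1 ≤ n then i + 1 else i
    out ++ [i, j, i, j]) []
  let q := fillAll n (fixFold (initCnt n) out)
  PySem.List.slice q.2 none (some (2*n))

def motif_zipper (n : Int) : List Int :=
  let out := (PySem.List.pyRange 1 (PySem.Int.floordiv n 2 + 1) 1).foldl (fun out i =>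
    let j := n - i + 1
    out ++ [i, j, i, j]) []
  let out := if PySem.Int.mod n 2 == 1 then
    (let k := PySem.Int.floordiv n 2 + 1
     out ++ [k, k]) else out
  PySem.List.slice out none (some (2*n))

-- 'while len(out) < 2*n: out += [a, b if b<=n else a]; a += 1; b += 1; if a>n: a=n; if b>n: b=n'
def ladderWhile (n : Int) (out : List Int) (a b : Int) : List Int :=
  if h : PySem.List.len out < 2*n then
    ladderWhile n (out ++ [a, if b ≤ n then b else a])
      (if a + 1 > n then n else a + 1) (if b + 1 > n then n else b + 1)
  else out
termination_by (2*n - PySem.List.len out).toNat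
decreasing_by
  simp only [PySem.List.len_eq, List.length_append, List.length_cons, List.length_nil] at *
  omega

def motif_ladder (n : Int) : List Int :=
  let out := ladderWhile n [] 1 2
  let q := fillAll n (fixFold (initCnt n) out)
  PySem.List.slice q.2 none (some (2*n))

def seedsS (n : Int) : List (List Int) :=
  [ motif_rainbow n,
    motif_doubled n,
    motif_interleave n,
    motif_zipper n,
    motif_ladder n,
    PySem.List.pyRange 1 (n+1) 1 ++ PySem.List.pyRange 1 (n+1) 1,
    ((PySem.List.pyRange 1 (n+1) 1).zip (PySem.List.pyRange 1 (n+1) 1)).flatMap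
      (fun p => [p.1, p.2]) ]

def motif_seeds (n : Int) : List (List Int) :=
  (seedsS n).foldl (fun out s =>
    if PySem.List.len s == 2*n
        && (PySem.List.pyRange 1 (n+1) 1).all (fun i => PySem.List.count s i == 2)
    then out ++ [s] else out) []

-- ===== PORT B =====

-- [min(i, 2*n + 1 - i) for i in range(1, 2*n + 1)]
def rainbow_alt (n : Int) : List Int :=
  (PySem.List.pyRange 1 (2*n+1) 1).map (fun i => min i (2*n + 1 - i))

-- [(i + 1) // 2 for i in range(1, 2*n + 1)]
def doubled_alt (n : Int) : List Int :=
  (PySem.List.pyRange 1 (2*n+1) 1).map (fun i => PySem.Int.floordiv (i + 1) 2)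

-- quads for odd i < n, plus (n, n) when n is odd
def interleave_alt (n : Int) : List Int :=
  let out := (PySem.List.pyRange 1 n 2).foldl (fun out i => out ++ [i, i+1, i, i+1]) []
  if PySem.Int.mod n 2 == 1 then out ++ [n, n] else out

-- 'while lo < hi: out += [lo, hi, lo, hi]; lo += 1; hi -= 1'
def zipWhileB (out : List Int) (lo hi : Int) : List Int × Int × Int :=
  if lo < hi then zipWhileB (out ++ [lo, hi, lo, hi]) (lo + 1) (hi - 1)
  else (out, lo, hi)
termination_by (hi - lo).toNat
decreasing_by omega

def zipper_alt (n : Int) : List Int :=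
  let p := zipWhileB [] 1 n
  if p.2.1 == p.2.2 then p.1 ++ [p.2.1, p.2.1] else p.1

-- 1, 2,2, 3,3, …, n,n, 1
def ladder_alt (n : Int) : List Int :=
  if n ≤ 0 then []
  else ((PySem.List.pyRange 2 (n+1) 1).foldl (fun out i => out ++ [i, i]) [1]) ++ [1]

def seedsB (n : Int) : List (List Int) :=
  [ rainbow_alt n,
    doubled_alt n,
    interleave_alt n,
    zipper_alt n,
    ladder_alt n,
    PySem.List.pyRange 1 (n+1) 1 ++ PySem.List.pyRange 1 (n+1) 1,
    (PySem.List.pyRange 1 (n+1) 1).flatMap (fun i => [i, i]) ]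

def motif_seeds_alt (n : Int) : List (List Int) :=
  let expected := PySem.List.sorted
    (PySem.List.pyRange 1 (n+1) 1 ++ PySem.List.pyRange 1 (n+1) 1) (fun x => x) false
  (seedsB n).filter (fun s =>
    PySem.List.len s == 2*n && (PySem.List.sorted s (fun x => x) false == expected))

-- ===== PRECONDITION & SPEC =====
def Spec_motif_seeds (n : Int) (out : List (List Int)) : Prop := out = motif_seeds_alt n
instance (n : Int) (out : List (List Int)) : Decidable (Spec_motif_seeds n out) := by unfold Spec_motif_seeds; infer_instance

-- ===== CLAIM (what is proved, stated in full; the proofs are below) =====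
def Claim_equal_motif_seeds : Prop := ∀ (n : Int), Dom_motif_seeds n → Spec_motif_seeds n (motif_seeds n)

-- ===== LEMMAS AND PROOFS =====

-- ---------- the filter condition: counting test ↔ sorted-comparison test ----------

-- counts → the elements of s all lie in 1..n (via the toFinset count sum)
lemma mem_range_of_counts (n : Int) (s : List Int)
    (hlen : (s.length : Int) = 2*n)
    (hc : ∀ i ∈ PySem.List.pyRange 1 (n+1) 1, s.count i = 2) :
    ∀ x ∈ s, x ∈ PySem.List.pyRange 1 (n+1) 1 := by
  have h0 : (0:Int) ≤ (s.length : Int) := Int.natCast_nonneg _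
  have hn : 0 ≤ n := by omega
  have hnd : (PySem.List.pyRange 1 (n+1) 1).Nodup := PySem.List.nodup_pyRange_one 1 (n+1)
  have hlenr : (PySem.List.pyRange 1 (n+1) 1).length = n.toNat := by
    rw [PySem.List.length_pyRange_one]; omega
  have htn : ((n.toNat : Int)) = n := Int.toNat_of_nonneg hn
  have hslen : s.length = 2 * n.toNat := by omega
  have hsub : (PySem.List.pyRange 1 (n+1) 1).toFinset ⊆ s.toFinset := by
    intro i hi
    rw [List.mem_toFinset] at hi ⊢
    have h2 := hc i hi
    exact List.count_pos_iff.mp (by omega)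
  have hsumF : ∑ a ∈ s.toFinset, s.count a = s.length := by
    simp
  have hcardG : (PySem.List.pyRange 1 (n+1) 1).toFinset.card = n.toNat := by
    rw [List.toFinset_card_of_nodup hnd, hlenr]
  have hsumG : ∑ a ∈ (PySem.List.pyRange 1 (n+1) 1).toFinset, s.count a = 2 * n.toNat := by
    rw [Finset.sum_congr rfl (fun i hi => hc i (List.mem_toFinset.mp hi))]
    simp [Finset.sum_const, hcardG, Nat.mul_comm]
  have hsdiff := Finset.sum_sdiff (f := fun a => s.count a) hsub
  simp only at hsdiff
  have hdiff : ∑ a ∈ s.toFinset \ (PySem.List.pyRange 1 (n+1) 1).toFinset, s.count a = 0 := by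
    omega
  intro x hx
  by_contra hxr
  have hxF : x ∈ s.toFinset \ (PySem.List.pyRange 1 (n+1) 1).toFinset :=
    Finset.mem_sdiff.mpr ⟨List.mem_toFinset.mpr hx, fun h => hxr (List.mem_toFinset.mp h)⟩
  have hz : s.count x = 0 := Finset.sum_eq_zero_iff.mp hdiff x hxF
  exact absurd (List.count_pos_iff.mpr hx) (by omega)

-- the core predicate equivalence, given the length test already passed
lemma counts_iff_perm (n : Int) (s : List Int)
    (hlen : (s.length : Int) = 2*n) :
    (∀ i ∈ PySem.List.pyRange 1 (n+1) 1, s.count i = 2) ↔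
      s.Perm (PySem.List.pyRange 1 (n+1) 1 ++ PySem.List.pyRange 1 (n+1) 1) := by
  have hnd : (PySem.List.pyRange 1 (n+1) 1).Nodup := PySem.List.nodup_pyRange_one 1 (n+1)
  constructor
  · intro hc
    rw [List.perm_iff_count]
    intro a
    by_cases ha : a ∈ PySem.List.pyRange 1 (n+1) 1
    · rw [hc a ha, List.count_append, List.count_eq_one_of_mem hnd ha]
    · have hs : a ∉ s := fun hmem => ha (mem_range_of_counts n s hlen hc a hmem)
      rw [List.count_eq_zero.mpr hs, List.count_append, List.count_eq_zero.mpr ha]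
  · intro hp i hi
    rw [hp.count_eq, List.count_append, List.count_eq_one_of_mem hnd hi]

lemma cond_eq (n : Int) (s : List Int) :
    (PySem.List.len s == 2*n
      && (PySem.List.pyRange 1 (n+1) 1).all (fun i => PySem.List.count s i == 2)) =
    (PySem.List.len s == 2*n
      && (PySem.List.sorted s (fun x => x) false ==
          PySem.List.sorted
            (PySem.List.pyRange 1 (n+1) 1 ++ PySem.List.pyRange 1 (n+1) 1) (fun x => x) false)) := by
  by_cases hl : (PySem.List.len s == 2*n) = true
  · simp only [hl, Bool.true_and]
    have hlen : (s.length : Int) = 2*n := by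
      simpa [PySem.List.len_eq] using hl
    rw [Bool.eq_iff_iff]
    simp only [List.all_eq_true, PySem.List.count_eq, beq_iff_eq]
    rw [PySem.List.sorted_id_eq_sorted_id_iff_perm]
    exact counts_iff_perm n s hlen
  · have hl' : ((s.length : Int) == 2*n) = false := by
      simpa [PySem.List.len_eq] using hl
    simp [hl']

-- ---------- generic machinery for A's fix / fill passes ----------

lemma fixFold_shift (out : List Int) (cnt : PySem.Dict Int Int) (acc : List Int) :
    out.foldl (fun p x =>
      if p.1.getD x 0 < 2 then (p.1.modify x 0 (· + 1), p.2 ++ [x]) else p) (cnt, acc) =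
    ((fixFold cnt out).1, acc ++ (fixFold cnt out).2) := by
  induction out generalizing cnt acc with
  | nil => simp [fixFold]
  | cons x xs ih =>
    rw [List.foldl_cons]
    unfold fixFold
    rw [List.foldl_cons]
    by_cases h : cnt.getD x 0 < 2
    · simp only [if_pos h, List.nil_append]
      rw [ih _ (acc ++ [x]), ih _ [x]]
      unfold fixFold
      simp [List.append_assoc]
    · simp only [if_neg h]
      rw [ih _ acc, ih _ []]
      unfold fixFold
      simp

lemma fixFold_append (cnt : PySem.Dict Int Int) (xs ys : List Int) :
    fixFold cnt (xs ++ ys) =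
      ((fixFold (fixFold cnt xs).1 ys).1,
       (fixFold cnt xs).2 ++ (fixFold (fixFold cnt xs).1 ys).2) := by
  have h := fixFold_shift ys (fixFold cnt xs).1 (fixFold cnt xs).2
  unfold fixFold at *
  rw [List.foldl_append]
  rw [← Prod.mk.eta (p := List.foldl _ ((cnt, []) : PySem.Dict Int Int × List Int) xs)] at *
  exact h

lemma fixFold_keep (out : List Int) (cnt : PySem.Dict Int Int)
    (h : ∀ v, cnt.getD v 0 + (out.count v : Int) ≤ 2) :
    (fixFold cnt out).2 = out ∧
      ∀ v, (fixFold cnt out).1.getD v 0 = cnt.getD v 0 + (out.count v : Int) := by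
  induction out generalizing cnt with
  | nil => simp [fixFold]
  | cons x xs ih =>
    have hcx := h x
    rw [List.count_cons_self] at hcx
    push_cast at hcx
    have hx : cnt.getD x 0 < 2 := by omega
    have hcond : ∀ v, (cnt.modify x 0 (· + 1)).getD v 0 + (xs.count v : Int) ≤ 2 := by
      intro v
      rw [PySem.Dict.getD_modify]
      have hv := h v
      rw [List.count_cons] at hv
      by_cases hvx : v = x <;> simp [hvx] at hv ⊢ <;> push_cast at hv ⊢ <;> omega
    have ih' := ih (cnt.modify x 0 (· + 1)) hcond
    have hfix : fixFold cnt (x :: xs) =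
        ((fixFold (cnt.modify x 0 (· + 1)) xs).1,
          [x] ++ (fixFold (cnt.modify x 0 (· + 1)) xs).2) := by
      unfold fixFold
      rw [List.foldl_cons]
      simp only [if_pos hx, List.nil_append]
      exact fixFold_shift xs _ [x]
    rw [hfix]
    constructor
    · simp [ih'.1]
    · intro v
      simp only
      rw [ih'.2 v, PySem.Dict.getD_modify, List.count_cons]
      by_cases hvx : v = x <;> simp [hvx] <;> push_cast <;> omega

lemma foldl_insert_zero_getD (l : List Int) (d : PySem.Dict Int Int)
    (hd : ∀ v, d.getD v 0 = 0) : ∀ v, (l.foldl (fun d i => d.insert i 0) d).getD v 0 = 0 := by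
  induction l generalizing d with
  | nil => exact hd
  | cons x xs ih =>
    simp only [List.foldl_cons]
    refine ih _ (fun v => ?_)
    by_cases hvx : v = x
    · subst hvx; rw [PySem.Dict.getD_insert_self]
    · rw [PySem.Dict.getD_insert_of_ne _ _ _ hvx]
      exact hd v

lemma initCnt_getD (n : Int) (v : Int) : (initCnt n).getD v 0 = 0 := by
  unfold initCnt
  exact foldl_insert_zero_getD _ _ (fun v => PySem.Dict.getD_empty v 0) v

lemma fillWhile_of_ge (cnt : PySem.Dict Int Int) (fixed : List Int) (i : Int)
    (h : 2 ≤ cnt.getD i 0) : fillWhile cnt fixed i = (cnt, fixed) := by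
  rw [fillWhile, dif_neg (by omega)]

lemma fillWhile_of_one (cnt : PySem.Dict Int Int) (fixed : List Int) (i : Int)
    (h : cnt.getD i 0 = 1) :
    fillWhile cnt fixed i = (cnt.modify i 0 (· + 1), fixed ++ [i]) := by
  rw [fillWhile, dif_pos (by omega)]
  rw [fillWhile, dif_neg (by rw [PySem.Dict.getD_modify_self]; omega)]

lemma fillFold_nop (l : List Int) (cnt : PySem.Dict Int Int) (fixed : List Int)
    (h : ∀ i ∈ l, 2 ≤ cnt.getD i 0) :
    l.foldl (fun p i => fillWhile p.1 p.2 i) (cnt, fixed) = (cnt, fixed) := by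
  induction l with
  | nil => rfl
  | cons x xs ih =>
    simp only [List.foldl_cons]
    rw [fillWhile_of_ge _ _ _ (h x (by simp))]
    exact ih (fun i hi => h i (by simp [hi]))

-- ---------- ranges and counts ----------

lemma pyRange_two (a b : Int) :
    PySem.List.pyRange a b 2 =
      (List.range (if a < b then ((b - a + 1) / 2).toNat else 0)).map
        (fun (k : Nat) => a + 2 * (k : Int)) := by
  rw [PySem.List.pyRange_of_pos a b (by norm_num)]
  have h : b - a + 2 - 1 = b - a + 1 := by ring
  rw [h]

-- count of v in the quad blocks over 1,3,5,…
lemma count_quadBlocks (k : Nat) (a v : Int) :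
    (((List.range k).map (fun (j : Nat) => a + 2 * (j : Int))).flatMap
        (fun i => [i, i+1, i, i+1])).count v = if a ≤ v ∧ v < a + 2*k then 2 else 0 := by
  induction k with
  | zero => simp
  | succ k ih =>
    rw [List.range_succ, List.map_append, List.flatMap_append, List.count_append, ih]
    simp only [List.map_cons, List.map_nil, List.flatMap_cons, List.flatMap_nil,
      List.append_nil, List.count_cons, List.count_nil]
    push_cast
    split_ifs <;> simp_all <;> omega

-- count of v in the ladder pairs x,x+1 over a,a+1,a+2,…
lemma count_pairBlocks (k : Nat) (a v : Int) :
    (((List.range k).map (fun (j : Nat) => a + (j : Int))).flatMap (fun x => [x, x+1])).count v =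
      (if a ≤ v ∧ v < a + k then 1 else 0) + (if a + 1 ≤ v ∧ v < a + k + 1 then 1 else 0) := by
  induction k with
  | zero => simp; split_ifs <;> omega
  | succ k ih =>
    rw [List.range_succ, List.map_append, List.flatMap_append, List.count_append, ih]
    simp only [List.map_cons, List.map_nil, List.flatMap_cons, List.flatMap_nil,
      List.append_nil, List.count_cons, List.count_nil]
    push_cast
    split_ifs <;> simp_all <;> omega

-- ---------- the five motif equalities (0 ≤ n) ----------

lemma length_flatMap_const (l : List Int) (f : Int → List Int) (c : Nat)
    (h : ∀ x, (f x).length = c) : (l.flatMap f).length = c * l.length := by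
  induction l with
  | nil => simp
  | cons x xs ih => simp [List.flatMap_cons, h, ih, Nat.mul_succ]; omega

lemma rainbow_eq (n : Int) (hn : 0 ≤ n) : motif_rainbow n = rainbow_alt n := by
  unfold motif_rainbow rainbow_alt
  rw [PySem.List.pyRange_one_append 1 (n+1) (2*n+1) (by omega) (by omega), List.map_append]
  congr 1
  · symm
    calc (PySem.List.pyRange 1 (n+1) 1).map (fun i => min i (2*n+1-i))
        = (PySem.List.pyRange 1 (n+1) 1).map id := List.map_congr_left (fun x hx => by
            rw [PySem.List.mem_pyRange_one] at hx; simp only [id]; omega)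
      _ = _ := List.map_id _
  · rw [PySem.List.pyRange_neg_one, PySem.List.pyRange_one, List.map_map]
    have h1 : (n - 0).toNat = (2*n+1 - (n+1)).toNat := by omega
    rw [h1]
    exact List.map_congr_left (fun k _ => by simp only [Function.comp]; omega)

lemma doubled_aux (m : Nat) :
    ((PySem.List.pyRange 1 ((m:Int)+1) 1).flatMap (fun i => [i, i])) =
      (PySem.List.pyRange 1 (2*(m:Int)+1) 1).map (fun i => PySem.Int.floordiv (i+1) 2) := by
  induction m with
  | zero => simp [PySem.List.pyRange_one_eq_nil]
  | succ m ih =>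
    push_cast
    rw [show (2*((m:Int)+1)+1) = (2*(m:Int)+1+1)+1 from by ring]
    rw [PySem.List.pyRange_one_succ_right (by omega : (1:Int) ≤ 2*(m:Int)+1+1),
        PySem.List.pyRange_one_succ_right (by omega : (1:Int) ≤ 2*(m:Int)+1),
        PySem.List.pyRange_one_succ_right (by omega : (1:Int) ≤ (m:Int)+1)]
    rw [List.flatMap_append, List.map_append, List.map_append, ih]
    simp only [List.flatMap_cons, List.flatMap_nil, List.map_cons, List.map_nil,
      List.append_nil, List.append_assoc]
    congr 1
    have f1 : PySem.Int.floordiv (2*(m:Int)+1+1) 2 = (m:Int)+1 := by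
      rw [PySem.Int.floordiv_eq_ediv_of_pos (by norm_num)]; omega
    have f2 : PySem.Int.floordiv (2*(m:Int)+1+1+1) 2 = (m:Int)+1 := by
      rw [PySem.Int.floordiv_eq_ediv_of_pos (by norm_num)]; omega
    rw [f1, f2]
    rfl

lemma doubled_eq (n : Int) (hn : 0 ≤ n) : motif_doubled n = doubled_alt n := by
  unfold motif_doubled doubled_alt
  rw [PySem.List.foldl_append_eq_flatMap, List.nil_append]
  lift n to Nat using hn with m
  exact doubled_aux m

lemma fixFold_quad (cnt : PySem.Dict Int Int) (x : Int) (h : cnt.getD x 0 = 0) :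
    fixFold cnt [x, x, x, x] = ((cnt.modify x 0 (· + 1)).modify x 0 (· + 1), [x, x]) := by
  unfold fixFold
  simp [List.foldl_cons, h, PySem.Dict.getD_modify_self]

lemma fixFold_pair_one (cnt : PySem.Dict Int Int) (x : Int) (h : cnt.getD x 0 = 1) :
    fixFold cnt [x, x] = (cnt.modify x 0 (· + 1), [x]) := by
  unfold fixFold
  simp [List.foldl_cons, h, PySem.Dict.getD_modify_self]

lemma fixFold_split (cnt : PySem.Dict Int Int) (out : List Int)
    (h : ∀ v, cnt.getD v 0 + (out.count v : Int) ≤ 2) :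
    fixFold cnt out = ((fixFold cnt out).1, out) := by
  conv_lhs => rw [← Prod.mk.eta (p := fixFold cnt out)]
  rw [(fixFold_keep out cnt h).1]

lemma interleave_eq (n : Int) (hn : 0 ≤ n) : motif_interleave n = interleave_alt n := by
  have he : PySem.Int.mod n 2 = n % 2 := PySem.Int.mod_eq_emod_of_pos (by norm_num)
  simp only [motif_interleave, interleave_alt]
  rw [PySem.List.foldl_append_eq_flatMap, PySem.List.foldl_append_eq_flatMap,
    List.nil_append, List.nil_append]
  have hRA : PySem.List.pyRange 1 (n+1) 2 =
      (List.range (((n+1)/2).toNat)).map (fun (j : Nat) => 1 + 2*(j : Int)) := by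
    rw [pyRange_two]
    split_ifs with hg
    · congr 2 <;> omega
    · have h2 : ((n+1)/2).toNat = 0 := by omega
      rw [h2]
  have hRB : PySem.List.pyRange 1 n 2 =
      (List.range ((n/2).toNat)).map (fun (j : Nat) => 1 + 2*(j : Int)) := by
    rw [pyRange_two]
    split_ifs with hg
    · congr 2 <;> omega
    · have h2 : (n/2).toNat = 0 := by omega
      rw [h2]
  rw [hRA, hRB]
  have hcong : ∀ x ∈ (List.range ((n/2).toNat)).map (fun (j : Nat) => 1 + 2*(j : Int)),
      [x, if x + 1 ≤ n then x + 1 else x, x, if x + 1 ≤ n then x + 1 else x] =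
        [x, x+1, x, x+1] := by
    intro x hx
    simp only [List.mem_map, List.mem_range] at hx
    obtain ⟨j, hj, rfl⟩ := hx
    rw [if_pos (by omega)]
  have hcnt : ∀ v, ((((List.range ((n/2).toNat)).map
      (fun (j : Nat) => 1 + 2*(j : Int))).flatMap (fun i => [i, i+1, i, i+1])).count v)
      = if 1 ≤ v ∧ v < 1 + 2*((n/2).toNat) then 2 else 0 := fun v => count_quadBlocks _ 1 v
  have hcond : ∀ v, (initCnt n).getD v 0 +
      (((((List.range ((n/2).toNat)).map (fun (j : Nat) => 1 + 2*(j : Int))).flatMap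
        (fun i => [i, i+1, i, i+1])).count v : Int)) ≤ 2 := by
    intro v
    rw [initCnt_getD, hcnt]
    split_ifs <;> simp
  have hlenF : ((((List.range ((n/2).toNat)).map
      (fun (j : Nat) => 1 + 2*(j : Int))).flatMap (fun i => [i, i+1, i, i+1])).length)
      = 4 * (n/2).toNat := by
    rw [length_flatMap_const _ _ 4 (fun x => rfl), List.length_map, List.length_range]
  by_cases hodd : n % 2 = 1
  · -- odd n: A appends the block [n,n,n,n], of which the repair pass keeps [n,n]
    have hc1 : (PySem.Int.mod n 2 == 1) = true := by simp only [beq_iff_eq, he]; omega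
    simp only [hc1, if_true]
    have hsr : ((n+1)/2).toNat = (n/2).toNat + 1 := by omega
    rw [hsr, List.range_succ, List.map_append, List.flatMap_append]
    simp only [List.map_cons, List.map_nil, List.flatMap_cons, List.flatMap_nil,
      List.append_nil]
    have hlast : (1:Int) + 2*(((n/2).toNat : Nat) : Int) = n := by omega
    rw [hlast, if_neg (by omega : ¬ n + 1 ≤ n)]
    rw [List.flatMap_congr hcong]
    rw [fixFold_append]
    obtain ⟨hk2, hk1⟩ := fixFold_keep _ (initCnt n) hcond
    have hCn : (fixFold (initCnt n)
        ((((List.range ((n/2).toNat)).map (fun (j : Nat) => 1 + 2*(j : Int))).flatMap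
          (fun i => [i, i+1, i, i+1])))).1.getD n 0 = 0 := by
      rw [hk1 n, initCnt_getD, hcnt n, if_neg (by omega)]
      rfl
    rw [fixFold_quad _ n hCn]
    simp only [hk2]
    have hC2 : ∀ v, (((fixFold (initCnt n)
        ((((List.range ((n/2).toNat)).map (fun (j : Nat) => 1 + 2*(j : Int))).flatMap
          (fun i => [i, i+1, i, i+1])))).1.modify n 0 (· + 1)).modify n 0 (· + 1)).getD v 0
        = if v = n then 2 else
            ((((List.range ((n/2).toNat)).map (fun (j : Nat) => 1 + 2*(j : Int))).flatMap
              (fun i => [i, i+1, i, i+1])).count v : Int) := by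
      intro v
      simp only [PySem.Dict.getD_modify, eq_self_iff_true, if_true]
      split_ifs with hv
      · rw [hCn]
        norm_num
      · rw [hk1 v, initCnt_getD]
        ring
    unfold fillAll
    rw [fillFold_nop _ _ _ ?hfill]
    case hfill =>
      intro i hi
      rw [PySem.List.mem_pyRange_one] at hi
      rw [hC2 i]
      split_ifs with h
      · omega
      · rw [hcnt i, if_pos (by omega)]
        norm_num
    rw [PySem.List.slice_to _ (by omega : (0:Int) ≤ 2*n)]
    apply List.take_of_length_le
    simp only [List.length_append, hlenF, List.length_cons, List.length_nil]
    omega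
  · -- even n: the quad blocks already have every count = 2; repair is the identity
    have hc1 : (PySem.Int.mod n 2 == 1) = false := by
      simp only [beq_eq_false_iff_ne, ne_eq, he]; omega
    simp only [hc1, Bool.false_eq_true, if_false]
    have hsr : ((n+1)/2).toNat = (n/2).toNat := by omega
    rw [hsr]
    rw [List.flatMap_congr hcong]
    rw [fixFold_split _ _ hcond]
    obtain ⟨hk2, hk1⟩ := fixFold_keep _ (initCnt n) hcond
    unfold fillAll
    rw [fillFold_nop _ _ _ ?hfill2]
    case hfill2 =>
      intro i hi
      rw [PySem.List.mem_pyRange_one] at hi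
      rw [hk1 i, initCnt_getD, hcnt i, if_pos (by omega)]
      norm_num
    rw [PySem.List.slice_to _ (by omega : (0:Int) ≤ 2*n)]
    apply List.take_of_length_le
    rw [hlenF]
    omega

lemma zipWhileB_spec (n : Int) : ∀ (m : Nat) (j : Int) (acc : List Int),
    1 ≤ j → j ≤ PySem.Int.floordiv n 2 + 1 → (PySem.Int.floordiv n 2 + 1 - j).toNat = m →
    zipWhileB acc j (n + 1 - j) =
      (acc ++ (PySem.List.pyRange j (PySem.Int.floordiv n 2 + 1) 1).flatMap
          (fun i => [i, n - i + 1, i, n - i + 1]),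
       PySem.Int.floordiv n 2 + 1, n - PySem.Int.floordiv n 2) := by
  have hq := PySem.Int.floordiv_mul_add_mod n 2
  have hr0 := PySem.Int.mod_nonneg n (by norm_num : (0:Int) < 2)
  have hr2 := PySem.Int.mod_lt n (by norm_num : (0:Int) < 2)
  intro m
  induction m with
  | zero =>
    intro j acc h1 h2 h3
    have hj : j = PySem.Int.floordiv n 2 + 1 := by omega
    rw [zipWhileB, if_neg (by omega)]
    rw [PySem.List.pyRange_one_eq_nil (by omega), List.flatMap_nil, List.append_nil]
    subst hj
    have : n + 1 - (PySem.Int.floordiv n 2 + 1) = n - PySem.Int.floordiv n 2 := by ring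
    rw [this]
  | succ m ih =>
    intro j acc h1 h2 h3
    rw [zipWhileB, if_pos (by omega)]
    rw [show n + 1 - j - 1 = n + 1 - (j + 1) from by ring]
    rw [ih (j+1) _ (by omega) (by omega) (by omega)]
    rw [PySem.List.pyRange_one_cons (by omega : j < PySem.Int.floordiv n 2 + 1),
      List.flatMap_cons]
    rw [show n + 1 - j = n - j + 1 from by ring]
    simp [List.append_assoc]

lemma zipper_eq (n : Int) (hn : 0 ≤ n) : motif_zipper n = zipper_alt n := by
  have hq := PySem.Int.floordiv_mul_add_mod n 2
  have hr0 := PySem.Int.mod_nonneg n (by norm_num : (0:Int) < 2)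
  have hr2 := PySem.Int.mod_lt n (by norm_num : (0:Int) < 2)
  unfold motif_zipper zipper_alt
  rw [PySem.List.foldl_append_eq_flatMap, List.nil_append]
  have hspec := zipWhileB_spec n (PySem.Int.floordiv n 2 + 1 - 1).toNat 1 []
    (by omega) (by omega) rfl
  rw [show n + 1 - 1 = n from by ring] at hspec
  rw [hspec]
  simp only [List.nil_append]
  have hlen : ((PySem.List.pyRange 1 (PySem.Int.floordiv n 2 + 1) 1).flatMap
      (fun i => [i, n - i + 1, i, n - i + 1])).length = 4 * (PySem.Int.floordiv n 2).toNat := by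
    rw [length_flatMap_const _ _ 4 (fun x => rfl), PySem.List.length_pyRange_one]
    omega
  have he : PySem.Int.mod n 2 = n % 2 := PySem.Int.mod_eq_emod_of_pos (by norm_num)
  by_cases hodd : PySem.Int.mod n 2 = 1
  · have hc1 : (PySem.Int.mod n 2 == 1) = true := by
      simp only [beq_iff_eq, he]; rw [he] at hodd; omega
    have hc2 : ((PySem.Int.floordiv n 2 + 1 : Int) == n - PySem.Int.floordiv n 2) = true := by
      simp only [beq_iff_eq]; omega
    simp only [hc1, hc2, if_pos]
    rw [PySem.List.slice_to _ (by omega : (0:Int) ≤ 2*n)]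
    apply List.take_of_length_le
    simp only [List.length_append, hlen, List.length_cons, List.length_nil]
    omega
  · have hc1 : (PySem.Int.mod n 2 == 1) = false := by
      simp only [beq_eq_false_iff_ne, ne_eq, he]; rw [he] at hodd; omega
    have hc2 : ((PySem.Int.floordiv n 2 + 1 : Int) == n - PySem.Int.floordiv n 2) = false := by
      simp only [beq_eq_false_iff_ne, ne_eq]; omega
    simp only [hc1, hc2, Bool.false_eq_true, if_false]
    rw [PySem.List.slice_to _ (by omega : (0:Int) ≤ 2*n)]
    apply List.take_of_length_le
    rw [hlen]
    omega

lemma fixFold_pair_zero (cnt : PySem.Dict Int Int) (x : Int) (h : cnt.getD x 0 = 0) :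
    fixFold cnt [x, x] = ((cnt.modify x 0 (· + 1)).modify x 0 (· + 1), [x, x]) := by
  unfold fixFold
  simp [List.foldl_cons, h, PySem.Dict.getD_modify_self]

lemma ladderWhile_spec (n : Int) (hn : 1 ≤ n) : ∀ (m : Nat) (a b : Int) (out : List Int),
    1 ≤ a → a ≤ n → (n - a).toNat = m → (out.length : Int) = 2*(a-1) →
    (a < n → b = a + 1) → (a = n → b = n ∨ n < b) →
    ladderWhile n out a b =
      out ++ (PySem.List.pyRange a (n+1) 1).flatMap
        (fun x => [x, if x + 1 ≤ n then x + 1 else x]) := by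
  intro m
  induction m with
  | zero =>
    intro a b out h1 h2 h3 h4 h5 h6
    have ha : a = n := by omega
    subst ha
    rw [ladderWhile, dif_pos (by simp only [PySem.List.len_eq]; omega)]
    rw [ladderWhile, dif_neg (by
      simp only [PySem.List.len_eq, List.length_append, List.length_cons, List.length_nil]
      push_cast
      omega)]
    rw [PySem.List.pyRange_one_singleton a]
    simp only [List.flatMap_cons, List.flatMap_nil, List.append_nil]
    rw [if_neg (by omega : ¬ a + 1 ≤ a)]
    rcases h6 rfl with hb | hb
    · rw [if_pos (by omega : b ≤ a), hb]
    · rw [if_neg (by omega : ¬ b ≤ a)]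
  | succ m ih =>
    intro a b out h1 h2 h3 h4 h5 h6
    have han : a < n := by omega
    have hb := h5 han
    subst hb
    rw [ladderWhile, dif_pos (by simp only [PySem.List.len_eq]; omega)]
    rw [if_pos (by omega : a + 1 ≤ n)]
    rw [if_neg (by omega : ¬ a + 1 > n)]
    have ih' := ih (a+1) (if a + 1 + 1 > n then n else a + 1 + 1) (out ++ [a, a + 1])
      (by omega) (by omega) (by omega)
      (by
        simp only [List.length_append, List.length_cons, List.length_nil]
        push_cast
        omega)
      (fun h => by rw [if_neg (by omega : ¬ a + 1 + 1 > n)])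
      (fun h => Or.inl (if_pos (by omega : a + 1 + 1 > n)))
    rw [ih']
    rw [PySem.List.pyRange_one_cons (by omega : a < n + 1), List.flatMap_cons]
    rw [if_pos (by omega : a + 1 ≤ n)]
    simp [List.append_assoc]

lemma ladder_bridge (m : Nat) :
    ((PySem.List.pyRange 1 ((m:Int)+1) 1).flatMap (fun x => [x, x+1])) ++ [((m:Int)+1)] =
      1 :: ((PySem.List.pyRange 2 ((m:Int)+1+1) 1).flatMap (fun i => [i, i])) := by
  induction m with
  | zero =>
    push_cast
    rw [PySem.List.pyRange_one_eq_nil (by omega), PySem.List.pyRange_one_eq_nil (by omega)]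
    rfl
  | succ m ih =>
    push_cast
    rw [PySem.List.pyRange_one_succ_right (by omega : (1:Int) ≤ (m:Int)+1)]
    rw [PySem.List.pyRange_one_succ_right (by omega : (2:Int) ≤ (m:Int)+1+1)]
    rw [List.flatMap_append, List.flatMap_append]
    simp only [List.flatMap_cons, List.flatMap_nil, List.append_nil]
    calc ((PySem.List.pyRange 1 ((m:Int)+1) 1).flatMap (fun x => [x, x+1]) ++
            [(m:Int)+1, (m:Int)+1+1]) ++ [(m:Int)+1+1]
        = ((PySem.List.pyRange 1 ((m:Int)+1) 1).flatMap (fun x => [x, x+1]) ++ [(m:Int)+1]) ++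
            [(m:Int)+1+1, (m:Int)+1+1] := by simp
      _ = (1 :: (PySem.List.pyRange 2 ((m:Int)+1+1) 1).flatMap (fun i => [i, i])) ++
            [(m:Int)+1+1, (m:Int)+1+1] := by rw [ih]
      _ = _ := by simp

lemma ladder_eq (n : Int) (hn : 0 ≤ n) : motif_ladder n = ladder_alt n := by
  simp only [motif_ladder, ladder_alt]
  by_cases h0 : n = 0
  · subst h0
    rw [ladderWhile, dif_neg (by simp [PySem.List.len_eq])]
    rw [if_pos (by omega : (0:Int) ≤ 0)]
    have h1 : fixFold (initCnt 0) [] = (initCnt 0, []) := rfl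
    rw [h1]
    unfold fillAll
    rw [PySem.List.pyRange_one_eq_nil (by omega)]
    rfl
  -- n ≥ 1: the while loop produces x,(x+1) pairs ending in n,n
  rw [ladderWhile_spec n (by omega) (n-1).toNat 1 2 [] (by omega) (by omega) (by omega)
    (by simp) (fun _ => rfl) (fun h => by omega)]
  simp only [List.nil_append]
  rw [if_neg (by omega : ¬ n ≤ 0)]
  rw [PySem.List.foldl_append_eq_flatMap]
  rw [PySem.List.pyRange_one_succ_right (by omega : (1:Int) ≤ n), List.flatMap_append]
  simp only [List.flatMap_cons, List.flatMap_nil, List.append_nil]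
  rw [if_neg (by omega : ¬ n + 1 ≤ n)]
  have hcong : ∀ x ∈ PySem.List.pyRange 1 n 1,
      [x, if x + 1 ≤ n then x + 1 else x] = [x, x+1] := by
    intro x hx
    rw [PySem.List.mem_pyRange_one] at hx
    rw [if_pos (by omega)]
  rw [List.flatMap_congr hcong]
  have hcnt : ∀ v, (((PySem.List.pyRange 1 n 1).flatMap (fun x => [x, x+1])).count v) =
      (if 1 ≤ v ∧ v < 1 + ((n-1).toNat : Int) then 1 else 0) +
        (if 1 + 1 ≤ v ∧ v < 1 + ((n-1).toNat : Int) + 1 then 1 else 0) := by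
    intro v
    rw [PySem.List.pyRange_one]
    exact count_pairBlocks (n-1).toNat 1 v
  have hcond : ∀ v, (initCnt n).getD v 0 +
      ((((PySem.List.pyRange 1 n 1).flatMap (fun x => [x, x+1])).count v : Int)) ≤ 2 := by
    intro v
    rw [initCnt_getD, hcnt]
    split_ifs <;> simp
  have hlenF : (((PySem.List.pyRange 1 n 1).flatMap (fun x => [x, x+1])).length)
      = 2 * (n-1).toNat := by
    rw [length_flatMap_const _ _ 2 (fun x => rfl), PySem.List.length_pyRange_one]
  rw [fixFold_append]
  obtain ⟨hk2, hk1⟩ := fixFold_keep _ (initCnt n) hcond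
  simp only [hk2]
  by_cases h1 : n = 1
  · -- n = 1: the pair [1,1] survives whole, nothing to fill
    subst h1
    have hC0 : (fixFold (initCnt 1)
        ((PySem.List.pyRange 1 1 1).flatMap (fun x => [x, x+1]))).1.getD 1 0 = 0 := by
      rw [hk1 1, initCnt_getD, hcnt 1]
      norm_num
    rw [fixFold_pair_zero _ _ hC0]
    unfold fillAll
    rw [PySem.List.pyRange_one_cons (by omega : (1:Int) < 1 + 1), List.foldl_cons]
    dsimp only
    rw [fillWhile_of_ge _ _ _ (by
      simp only [PySem.Dict.getD_modify_self, hC0]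
      norm_num)]
    rw [PySem.List.pyRange_one_eq_nil (by omega : (1:Int) + 1 ≤ 1 + 1), List.foldl_nil]
    dsimp only
    rw [PySem.List.slice_to _ (by omega : (0:Int) ≤ 2*1)]
    rw [PySem.List.pyRange_one_eq_nil (by omega : (1:Int) ≤ 1)]
    rw [PySem.List.pyRange_one_eq_nil (by omega : (1:Int) + 1 ≤ 2)]
    rfl
  · -- n ≥ 2: the loop's extra n is dropped and a closing 1 is filled in
    have hC1 : (fixFold (initCnt n)
        ((PySem.List.pyRange 1 n 1).flatMap (fun x => [x, x+1]))).1.getD n 0 = 1 := by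
      rw [hk1 n, initCnt_getD, hcnt n]
      rw [if_neg (by omega), if_pos (by omega)]
      norm_num
    rw [fixFold_pair_one _ _ hC1]
    unfold fillAll
    rw [PySem.List.pyRange_one_cons (by omega : (1:Int) < n + 1), List.foldl_cons]
    rw [show PySem.List.pyRange (1+1) (n+1) 1 = PySem.List.pyRange 2 (n+1) 1 from by norm_num]
    have hg1 : ((fixFold (initCnt n)
        ((PySem.List.pyRange 1 n 1).flatMap (fun x => [x, x+1]))).1.modify n 0
          (· + 1)).getD 1 0 = 1 := by
      rw [PySem.Dict.getD_modify, if_neg (by omega : ¬ (1:Int) = n)]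
      rw [hk1 1, initCnt_getD, hcnt 1]
      rw [if_pos (by omega), if_neg (by omega)]
      norm_num
    rw [fillWhile_of_one _ _ _ hg1]
    have hfill : ∀ i ∈ PySem.List.pyRange 2 (n+1) 1,
        2 ≤ ((((fixFold (initCnt n)
          ((PySem.List.pyRange 1 n 1).flatMap (fun x => [x, x+1]))).1.modify n 0
            (· + 1)).modify 1 0 (· + 1))).getD i 0 := by
      intro i hi
      rw [PySem.List.mem_pyRange_one] at hi
      rw [PySem.Dict.getD_modify, if_neg (by omega : ¬ i = 1)]
      rw [PySem.Dict.getD_modify]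
      split_ifs with hin
      · rw [hk1 n, initCnt_getD, hcnt n]
        rw [if_neg (by omega), if_pos (by omega)]
        norm_num
      · rw [hk1 i, initCnt_getD, hcnt i]
        rw [if_pos (by omega), if_pos (by omega)]
        norm_num
    rw [fillFold_nop _ _ _ hfill]
    rw [PySem.List.slice_to _ (by omega : (0:Int) ≤ 2*n)]
    rw [List.take_of_length_le (by
      simp only [List.length_append, List.length_cons, List.length_nil, hlenF]
      omega)]
    -- the assembled list equals B's [1] ++ pairs ++ [1]
    have hb := ladder_bridge (n-1).toNat
    rw [show ((n-1).toNat : Int) + 1 = n from by omega] at hb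
    calc ((PySem.List.pyRange 1 n 1).flatMap (fun x => [x, x+1]) ++ [n]) ++ [1]
        = (1 :: (PySem.List.pyRange 2 (n+1) 1).flatMap (fun i => [i, i])) ++ [1] := by
          rw [hb]
      _ = _ := by simp

lemma zipSelf (l : List Int) :
    (l.zip l).flatMap (fun p => [p.1, p.2]) = l.flatMap (fun i => [i, i]) := by
  induction l with
  | nil => rfl
  | cons x xs ih => simp [List.zip_cons_cons, ih]

lemma seeds_eq (n : Int) (hn : 0 ≤ n) : seedsS n = seedsB n := by
  unfold seedsS seedsB
  rw [rainbow_eq n hn, doubled_eq n hn, interleave_eq n hn, zipper_eq n hn,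
    ladder_eq n hn, zipSelf]

-- ===== VERDICT (by name: the statement is the Claim_ definition above) =====
theorem motif_seeds_spec : Claim_equal_motif_seeds := by
  intro n _
  unfold Spec_motif_seeds motif_seeds motif_seeds_alt
  rw [PySem.List.foldl_append_if_eq_filter]
  simp only [List.nil_append]
  rw [List.filter_congr (fun s _ => cond_eq n s)]
  by_cases hn : 0 ≤ n
  · rw [seeds_eq n hn]
  · have hnil : ∀ (L : List (List Int)),
        L.filter (fun s =>
          PySem.List.len s == 2*n && (PySem.List.sorted s (fun x => x) false ==
            PySem.List.sorted
              (PySem.List.pyRange 1 (n+1) 1 ++ PySem.List.pyRange 1 (n+1) 1) (fun x => x) false)) = [] := by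
      intro L
      apply List.filter_eq_nil_iff.mpr
      intro s _
      simp only [Bool.and_eq_true, not_and, PySem.List.len_eq, beq_iff_eq]
      exact fun h => absurd h (by omega)
    rw [hnil, hnil]
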